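-- pv_equiv track=rewrite | github.com/iam52/coding_everyday | 프로그래머스/0/181887. 홀수 vs 짝수/홀수 vs 짝수.py | solution
-- ===== SOURCE A (Python) =====
-- def solution(num_list):
--     answer = 0
--     num_dict = {}
--     for i in range(len(num_list)):
--         num_dict[i+1] = num_list[i]
--
--     even_sum = 0
--     odd_sum = 0
--     for idx, value in num_dict.items():
--         if idx % 2 == 0:
--             even_sum += value
--         elif idx % 2 != 0:
--             odd_sum += value
--
--     if even_sum > odd_sum:
--         answer = even_sum
--     else:
--         answer = odd_sum
--     return answer
-- ===== SOURCE B (Python) =====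
-- def solution(num_list):
--     total = 0
--     diff = 0
--     for x in num_list:
--         total += x
--         diff = x - diff
--     return (total + abs(diff)) // 2
-- ===== Notes on version B (the rewrite author's own statement) =====
-- stated objective: alternative
-- what changed: Replaced the dict build plus parity-branching accumulation and final comparison by one branch-free pass keeping the total and a back-alternating difference, returning (total+abs(diff))//2 via the identity max(a,b)=(a+b+|a-b|)/2.
import Mathlib
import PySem

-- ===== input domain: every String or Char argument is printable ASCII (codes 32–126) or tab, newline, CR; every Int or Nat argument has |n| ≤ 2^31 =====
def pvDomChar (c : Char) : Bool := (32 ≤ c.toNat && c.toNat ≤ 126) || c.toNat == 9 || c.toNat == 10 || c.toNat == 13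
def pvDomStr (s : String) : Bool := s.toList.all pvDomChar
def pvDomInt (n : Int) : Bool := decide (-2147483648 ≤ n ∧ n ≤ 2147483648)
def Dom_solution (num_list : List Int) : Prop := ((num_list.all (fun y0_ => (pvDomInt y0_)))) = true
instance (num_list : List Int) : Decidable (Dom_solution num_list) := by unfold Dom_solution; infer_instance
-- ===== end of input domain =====

-- B replaces A's dict build + parity-branching loop + comparison by one branch-free pass
-- (running total and back-alternating difference) and the identity max(a,b) = (a+b+|a-b|)//2.

-- ===== PORT A =====
def solution (num_list : List Int) : Int :=
  let num_dict : PySem.Dict Int Int :=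
    (PySem.List.pyRange 0 (PySem.List.len num_list) 1).foldl
      (fun d i => d.insert (i + 1) (PySem.List.pyGetD num_list i 0)) PySem.Dict.empty
  let es : Int × Int :=
    num_dict.items.foldl
      (fun p kv =>
        if PySem.Int.mod kv.1 2 == 0 then (p.1 + kv.2, p.2)
        else if PySem.Int.mod kv.1 2 != 0 then (p.1, p.2 + kv.2)
        else p)
      (0, 0)
  if es.1 > es.2 then es.1 else es.2

-- ===== PORT B =====
def solution_alt (num_list : List Int) : Int :=
  let r : Int × Int := num_list.foldl (fun (p : Int × Int) x => (p.1 + x, x - p.2)) (0, 0)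
  PySem.Int.floordiv (r.1 + |r.2|) 2

-- ===== PRECONDITION & SPEC =====
def Spec_solution (num_list : List Int) (out : Int) : Prop := out = solution_alt num_list
instance (num_list : List Int) (out : Int) : Decidable (Spec_solution num_list out) := by unfold Spec_solution; infer_instance

-- ===== CLAIM =====
def Claim_equal_solution : Prop := ∀ (num_list : List Int), Dom_solution num_list → Spec_solution num_list (solution num_list)

-- ===== LEMMAS AND PROOFS =====
def evens {α : Type} : List α → List α
  | [] => []
  | a :: l => a :: evens l.tail
termination_by xs => xs.length
decreasing_by simp [List.length_tail]

lemma evens_nil {α : Type} : evens ([] : List α) = [] := by simp [evens]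
lemma evens_cons {α : Type} (a : α) (l : List α) : evens (a :: l) = a :: evens l.tail := by
  rw [evens]

def pstep : (Int × Int) → (Int × Int) → (Int × Int) := fun p kv =>
  if PySem.Int.mod kv.1 2 == 0 then (p.1 + kv.2, p.2)
  else if PySem.Int.mod kv.1 2 != 0 then (p.1, p.2 + kv.2)
  else p

def enum1 (k : Int) : List Int → List (Int × Int)
  | [] => []
  | x :: t => (k, x) :: enum1 (k + 1) t

lemma range_map_enum (xs : List Int) : ∀ (k : Int),
    (List.range xs.length).map (fun (i : Nat) => ((i:Int) + k, xs.getD i 0)) = enum1 k xs := by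
  induction xs with
  | nil => intro k; simp [enum1]
  | cons x t ih =>
    intro k
    rw [List.length_cons, List.range_succ_eq_map, List.map_cons, List.map_map]
    simp only [enum1, Nat.cast_zero, zero_add, List.getD_cons_zero]
    congr 1
    rw [← ih (k + 1)]
    apply List.map_congr_left
    intro i _
    simp only [Function.comp_apply, Nat.succ_eq_add_one, List.getD_cons_succ,
      Prod.mk.injEq, and_true]
    push_cast; ring

lemma items_eq (xs : List Int) :
    ((PySem.List.pyRange 0 (PySem.List.len xs) 1).foldl
      (fun d i => d.insert (i + 1) (PySem.List.pyGetD xs i 0)) PySem.Dict.empty).items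
    = enum1 1 xs := by
  have h := PySem.Dict.items_foldl_insert_fresh
      (PySem.List.pyRange 0 (PySem.List.len xs) 1)
      (fun i => i + 1) (fun i => PySem.List.pyGetD xs i 0) PySem.Dict.empty
      (fun a _ => PySem.Dict.contains_empty _)
      (by
        apply List.Nodup.map
        · intro a b hab; simp only at hab; omega
        · exact PySem.List.nodup_pyRange_one 0 _)
  rw [h]
  rw [PySem.List.len_eq, PySem.List.pyRange_zero_nat, List.map_map]
  rw [← range_map_enum xs 1]
  have he : (PySem.Dict.empty : PySem.Dict Int Int).items = [] := rfl
  rw [he, List.nil_append]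
  apply List.map_congr_left
  intro i _
  simp [Function.comp]

lemma fold_enum1 (xs : List Int) : ∀ (m : Nat) (e o : Int),
    (enum1 (2 * (m:Int) + 1) xs).foldl pstep (e, o) = (e + (evens xs.tail).sum, o + (evens xs).sum) := by
  induction hn : xs.length using Nat.strong_induction_on generalizing xs with
  | _ n ih0 =>
  subst hn
  cases xs with
  | nil => simp [enum1, evens_nil]
  | cons x l =>
    cases l with
    | nil =>
      intro m e o
      have h1 : PySem.Int.mod (2 * (m:Int) + 1) 2 = 1 := by
        rw [PySem.Int.mod_eq_emod_of_pos (by omega)]; omega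
      simp [enum1, pstep, evens_cons, evens_nil]
    | cons y t =>
      intro m e o
      have h1 : PySem.Int.mod (2 * (m:Int) + 1) 2 = 1 := by
        rw [PySem.Int.mod_eq_emod_of_pos (by omega)]; omega
      have h2 : PySem.Int.mod (2 * (m:Int) + 1 + 1) 2 = 0 := by
        rw [PySem.Int.mod_eq_emod_of_pos (by omega)]; omega
      have h3 : (2 * (m:Int) + 1 + 1 + 1) = 2 * ((m:Int) + 1) + 1 := by ring
      have ih := ih0 t.length (by simp) t rfl (m + 1) (e + y) (o + x)
      push_cast at ih
      simp only [enum1, List.foldl_cons, pstep, h1, h2, h3]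
      norm_num
      rw [ih]
      simp [evens_cons, List.tail_cons]
      constructor <;> ring

-- B's single pass: first component is the total, second is ±(E−O) where
-- E = sum at 0-based even positions, O = sum at 0-based odd positions.
lemma foldB (xs : List Int) : ∀ (s d : Int),
    (xs.foldl (fun (p : Int × Int) x => (p.1 + x, x - p.2)) (s, d)).1
      = s + (evens xs).sum + (evens xs.tail).sum
    ∧ ((xs.foldl (fun (p : Int × Int) x => (p.1 + x, x - p.2)) (s, d)).2
          = (evens xs).sum - (evens xs.tail).sum - d
       ∨ (xs.foldl (fun (p : Int × Int) x => (p.1 + x, x - p.2)) (s, d)).2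
          = (evens xs.tail).sum - (evens xs).sum + d) := by
  induction hn : xs.length using Nat.strong_induction_on generalizing xs with
  | _ n ih0 =>
  subst hn
  cases xs with
  | nil =>
    intro s d
    simp [evens_nil]
  | cons x l =>
    cases l with
    | nil =>
      intro s d
      simp [evens_cons, evens_nil]
    | cons y t =>
      intro s d
      have ih := ih0 t.length (by simp) t rfl (s + x + y) (y - (x - d))
      obtain ⟨ih1, ih2⟩ := ih
      have hE : (evens (x :: y :: t)).sum = x + (evens t).sum := by
        simp [evens_cons]
      have hO : (evens (x :: y :: t).tail).sum = y + (evens t.tail).sum := by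
        simp [evens_cons]
      simp only [List.foldl_cons] at *
      constructor
      · rw [ih1, hE, hO]; ring
      · rcases ih2 with h | h
        · left; rw [h, hE, hO]; ring
        · right; rw [h, hE, hO]; ring

theorem solution_eq_alt (xs : List Int) : solution xs = solution_alt xs := by
  unfold solution solution_alt
  simp only []
  rw [items_eq]
  have hfold := fold_enum1 xs 0 0 0
  norm_num at hfold
  obtain ⟨hB1, hB2⟩ := foldB xs 0 0
  set r := xs.foldl (fun (p : Int × Int) x => (p.1 + x, x - p.2)) (0, 0) with hr
  set E := (evens xs).sum with hE
  set O := (evens xs.tail).sum with hO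
  show (if (((enum1 1 xs).foldl pstep (0,0)).1 > ((enum1 1 xs).foldl pstep (0,0)).2)
        then ((enum1 1 xs).foldl pstep (0,0)).1 else ((enum1 1 xs).foldl pstep (0,0)).2)
      = PySem.Int.floordiv (r.1 + |r.2|) 2
  rw [hfold]
  have hr1 : r.1 = E + O := by rw [hB1]; ring
  have habs : |r.2| = |E - O| := by
    rcases hB2 with h | h
    · rw [h]; norm_num
    · rw [h, show O - E + (0:Int) = -(E - O) by ring, abs_neg]
  rw [hr1, habs, PySem.Int.floordiv_eq_ediv_of_pos (by omega)]
  rcases le_or_gt O E with h | h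
  · rw [if_neg (by omega), abs_of_nonneg (by omega),
      show E + O + (E - O) = E * 2 by ring, Int.mul_ediv_cancel _ (by omega)]
  · rw [if_pos (by omega), abs_of_nonpos (by omega),
      show E + O + -(E - O) = O * 2 by ring, Int.mul_ediv_cancel _ (by omega)]

-- ===== VERDICT =====
theorem solution_spec : Claim_equal_solution := by
  intro num_list _
  unfold Spec_solution
  exact solution_eq_alt num_list
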